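-- pv_equiv track=rewrite | github.com/kimgyuhee/Python | Chapter0_Algorithm/2305/230504/test02.py | solution
-- ===== SOURCE A (Python) =====
-- def solution(myString):
--     answer = myString.split("x")
--     result = []
--     for a in answer :
--         if a == "" :
--             continue
--         result.append(a)
--     return sorted(result)
-- ===== SOURCE B (Python) =====
-- def solution(myString):
--     # Single pass over the characters with a buffer instead of str.split.
--     result = []
--     buf = ""
--     for c in myString:
--         if c == "x":
--             if buf:
--                 result.append(buf)
--                 buf = ""
--         else:
--             buf = buf + c
--     if buf:
--         result.append(buf)
--     return sorted(result)
-- ===== Notes on version B (the rewrite author's own statement) =====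
-- stated objective: alternative
-- what changed: Replaces str.split plus a filtering loop by a single character-level scan with an explicit buffer that emits non-empty tokens directly, then sorts.
import Mathlib
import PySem

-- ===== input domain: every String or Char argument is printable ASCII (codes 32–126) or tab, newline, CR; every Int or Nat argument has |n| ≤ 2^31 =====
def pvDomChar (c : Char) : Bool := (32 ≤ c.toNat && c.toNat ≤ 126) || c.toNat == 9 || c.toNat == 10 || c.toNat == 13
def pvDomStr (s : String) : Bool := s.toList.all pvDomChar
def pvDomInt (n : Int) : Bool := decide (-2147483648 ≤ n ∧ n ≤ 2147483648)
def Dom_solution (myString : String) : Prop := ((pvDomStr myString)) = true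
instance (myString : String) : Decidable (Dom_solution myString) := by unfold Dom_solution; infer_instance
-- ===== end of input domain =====

-- B replaces str.split plus a filtering loop by one character scan with an explicit buffer; objective: alternative decomposition.

-- ===== PORT A =====
def solution (myString : String) : List String :=
  let answer : List String := (PySem.Str.split? myString "x").getD []
  let result : List String := answer.foldl (fun r a => if a = "" then r else r ++ [a]) []
  PySem.List.sorted result (fun x => x) false

-- ===== PORT B =====
def solution_alt (myString : String) : List String :=
  let st := myString.toList.foldl
    (fun (st : List String × List Char) c =>
      if c = 'x' then
        (if st.2 = [] then st else (st.1 ++ [String.ofList st.2], []))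
      else (st.1, st.2 ++ [c]))
    ([], [])
  let result : List String := if st.2 = [] then st.1 else st.1 ++ [String.ofList st.2]
  PySem.List.sorted result (fun x => x) false

-- ===== PRECONDITION & SPEC =====
def Spec_solution (myString : String) (out : List String) : Prop := out = solution_alt myString
instance (myString : String) (out : List String) : Decidable (Spec_solution myString out) := by unfold Spec_solution; infer_instance

-- ===== CLAIM (what is proved, stated in full; the proofs are below) =====
def Claim_equal_solution : Prop := ∀ (myString : String), Dom_solution myString → Spec_solution myString (solution myString)

-- ===== LEMMAS AND PROOFS =====

/-- Proof-only spec of splitting on 'x' with an append-style buffer. -/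
def pvScanPieces (cs : List Char) (cur : List Char) : List (List Char) :=
  match cs with
  | [] => [cur]
  | c :: rest => if c = 'x' then cur :: pvScanPieces rest [] else pvScanPieces rest (cur ++ [c])

/-- The step function of B's fold, named for the proofs. -/
def pvStep (st : List String × List Char) (c : Char) : List String × List Char :=
  if c = 'x' then
    (if st.2 = [] then st else (st.1 ++ [String.ofList st.2], []))
  else (st.1, st.2 ++ [c])

/-- The final flush of B's buffer, named for the proofs. -/
def pvFlush (st : List String × List Char) : List String :=
  if st.2 = [] then st.1 else st.1 ++ [String.ofList st.2]

lemma pvGo_eq : ∀ (cs : List Char) (fuel : Nat) (cur : List Char) (acc : List (List Char)),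
    cs.length ≤ fuel →
    PySem.Chars.splitOn.go ['x'] fuel cs cur acc = acc.reverse ++ pvScanPieces cs cur.reverse := by
  intro cs
  induction cs with
  | nil =>
    intro fuel cur acc _
    cases fuel <;> simp [PySem.Chars.splitOn.go.eq_def, pvScanPieces]
  | cons c rest ih =>
    intro fuel cur acc h
    cases fuel with
    | zero => simp at h
    | succ f =>
      rw [PySem.Chars.splitOn.go.eq_def]
      by_cases hc : c = 'x'
      · subst hc
        simp only [List.isPrefixOf, List.length_cons, List.drop_succ_cons,
          BEq.rfl, Bool.and_true, if_true, List.length_nil, List.drop_zero]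
        rw [ih f [] (cur.reverse :: acc) (Nat.le_of_succ_le_succ h)]
        simp [pvScanPieces]
      · have hpre : (['x'].isPrefixOf (c :: rest)) = false := by
          simp [List.isPrefixOf]; exact fun hx => (hc hx.symm).elim
        simp only [hpre, Bool.false_eq_true, if_false]
        rw [ih f (c :: cur) acc (Nat.le_of_succ_le_succ h)]
        simp [pvScanPieces, hc]

lemma pvSplitOn_eq (cs : List Char) :
    PySem.Chars.splitOn cs ['x'] = pvScanPieces cs [] := by
  rw [PySem.Chars.splitOn, pvGo_eq cs (cs.length + 1) [] [] (Nat.le_succ _)]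
  simp

lemma pvFold_eq : ∀ (cs buf : List Char) (acc : List String),
    pvFlush (cs.foldl pvStep (acc, buf)) =
    ((pvScanPieces cs buf).map String.ofList).foldl
      (fun r a => if a = "" then r else r ++ [a]) acc := by
  intro cs
  induction cs with
  | nil =>
    intro buf acc
    by_cases hb : buf = [] <;>
      simp [pvFlush, pvScanPieces, hb, String.ofList_eq_empty_iff]
  | cons c rest ih =>
    intro buf acc
    by_cases hc : c = 'x'
    · subst hc
      by_cases hb : buf = []
      · subst hb
        rw [List.foldl_cons, show pvStep (acc, ([] : List Char)) 'x' = (acc, []) by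
          simp [pvStep], ih]
        simp [pvScanPieces]
      · rw [List.foldl_cons, show pvStep (acc, buf) 'x' = (acc ++ [String.ofList buf], []) by
          simp [pvStep, hb], ih]
        simp [pvScanPieces, String.ofList_eq_empty_iff, hb]
    · rw [List.foldl_cons, show pvStep (acc, buf) c = (acc, buf ++ [c]) by
        simp [pvStep, hc], ih]
      simp [pvScanPieces, hc]

-- ===== VERDICT (by name: the statement is the Claim_ definition above) =====
theorem solution_spec : Claim_equal_solution := by
  intro s _
  unfold Spec_solution solution solution_alt
  simp only [PySem.Str.split?, show ("x" : String).toList = ['x'] from rfl,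
    PySem.Chars.split?, List.isEmpty_cons, Bool.false_eq_true, if_false,
    Option.map_some, Option.getD_some, pvSplitOn_eq]
  rw [← pvFold_eq s.toList [] []]
  rfl
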